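-- pv_equiv track=rewrite | github.com/zhtluo/cp-reference | util/compress.py | compress_code
-- ===== SOURCE A (Python) =====
-- def compress_code(input_code, max_length=80):
--     """
--     Compresses input code into fewer lines based on these rules:
--       - Code is separated by empty lines into different code blocks.
--       - Empty lines are omitted in the output.
--       - Within the same code block, the first line retains its indent.
--       - Subsequent lines have their leading whitespace removed and are appended with a space.
--       - Lines are accumulated until appending another line would exceed max_length characters.
--     """
--     # Split input into lines and group them into blocks using empty lines as delimiters
--     lines = input_code.splitlines()
--     blocks = []
--     current_block = []
--     for line in lines:
--         if line.strip() == "":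
--             if current_block:
--                 blocks.append(current_block)
--                 current_block = []
--         else:
--             current_block.append(line)
--     if current_block:
--         blocks.append(current_block)
--
--     # Process each block
--     output_lines = []
--     for block in blocks:
--         # Start with the first line (keep its indent)
--         accumulator = block[0]
--         # Process subsequent lines in the block
--         for line in block[1:]:
--             stripped_line = line.strip()  # remove leading whitespace
--             if len(accumulator) + 1 + len(stripped_line) > max_length:
--                 output_lines.append(accumulator)
--                 accumulator = line
--             else:
--                 accumulator += " " + stripped_line
--         output_lines.append(accumulator)
--
--     return "\n".join(output_lines)
-- ===== SOURCE B (Python) =====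
-- def compress_code(input_code, max_length=80):
--     # Single fused pass: acc is None between blocks; flush on blank lines and overflow.
--     output_lines = []
--     acc = None
--     for line in input_code.splitlines():
--         stripped = line.strip()
--         if stripped == "":
--             if acc is not None:
--                 output_lines.append(acc)
--                 acc = None
--         elif acc is None:
--             acc = line
--         elif len(acc) + 1 + len(stripped) > max_length:
--             output_lines.append(acc)
--             acc = line
--         else:
--             acc = acc + " " + stripped
--     if acc is not None:
--         output_lines.append(acc)
--     return "\n".join(output_lines)
-- ===== Notes on version B (the rewrite author's own statement) =====
-- stated objective: simpler
-- what changed: Replaced A's two-phase design (first group lines into a list of blocks, then fold each block into output lines) with one fused pass over the lines keeping a single optional accumulator that is flushed on blank lines and on overflow, so the intermediate list of blocks disappears.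
import Mathlib
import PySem

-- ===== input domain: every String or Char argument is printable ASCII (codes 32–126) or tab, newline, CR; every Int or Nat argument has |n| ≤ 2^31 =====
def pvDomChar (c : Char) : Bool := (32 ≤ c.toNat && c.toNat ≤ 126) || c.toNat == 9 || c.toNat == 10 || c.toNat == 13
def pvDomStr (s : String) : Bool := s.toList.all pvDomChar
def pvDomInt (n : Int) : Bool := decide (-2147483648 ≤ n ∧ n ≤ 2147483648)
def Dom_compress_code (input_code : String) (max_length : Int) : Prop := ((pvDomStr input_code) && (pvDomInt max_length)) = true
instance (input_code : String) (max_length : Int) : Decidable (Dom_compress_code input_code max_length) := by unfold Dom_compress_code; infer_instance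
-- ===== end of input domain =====

-- B fuses A's two phases (group lines into blocks, then greedily pack each block) into one
-- pass with a single optional accumulator; objective: simpler (no intermediate block list).

-- ===== PORT A =====
-- first loop body: group lines into blocks separated by blank lines
def pvSplitStep (st : List (List String) × List String) (line : String) :
    List (List String) × List String :=
  if PySem.Str.strip line = "" then
    if st.2 = [] then st else (st.1 ++ [st.2], [])
  else (st.1, st.2 ++ [line])

-- inner loop body of the second phase (state: output_lines so far, accumulator)
def pvInnerStep (max_length : Int) (p : List String × String) (line : String) :
    List String × String :=
  let stripped := PySem.Str.strip line
  if PySem.Str.len p.2 + 1 + PySem.Str.len stripped > max_length then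
    (p.1 ++ [p.2], line)
  else
    (p.1, p.2 ++ " " ++ stripped)

-- outer loop body of the second phase; blocks are nonempty by construction
-- (Python's block[0] would raise on an empty block, which never occurs)
def pvOuterStep (max_length : Int) (out : List String) (block : List String) : List String :=
  match block with
  | [] => out
  | b0 :: rest =>
    let p := rest.foldl (pvInnerStep max_length) (out, b0)
    p.1 ++ [p.2]

def compress_code (input_code : String) (max_length : Int) : String :=
  let lines := PySem.Str.splitlines input_code
  let st := lines.foldl pvSplitStep ([], [])
  let blocks := if st.2 = [] then st.1 else st.1 ++ [st.2]
  let output_lines := blocks.foldl (pvOuterStep max_length) []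
  PySem.Str.join "\n" output_lines

-- ===== PORT B =====
-- fused loop body: acc is none between blocks, flushed on blank lines and on overflow
def pvFusedStep (max_length : Int) (st : List String × Option String) (line : String) :
    List String × Option String :=
  let stripped := PySem.Str.strip line
  if stripped = "" then
    match st.2 with
    | some a => (st.1 ++ [a], none)
    | none => st
  else
    match st.2 with
    | none => (st.1, some line)
    | some a =>
      if PySem.Str.len a + 1 + PySem.Str.len stripped > max_length then
        (st.1 ++ [a], some line)
      else
        (st.1, some (a ++ " " ++ stripped))

def compress_code_alt (input_code : String) (max_length : Int) : String :=
  let st := (PySem.Str.splitlines input_code).foldl (pvFusedStep max_length) ([], none)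
  let output_lines := match st.2 with
    | some a => st.1 ++ [a]
    | none => st.1
  PySem.Str.join "\n" output_lines

-- ===== PRECONDITION & SPEC =====
def Spec_compress_code (input_code : String) (max_length : Int) (out : String) : Prop := out = compress_code_alt input_code max_length
instance (input_code : String) (max_length : Int) (out : String) : Decidable (Spec_compress_code input_code max_length out) := by unfold Spec_compress_code; infer_instance

-- ===== CLAIM (what is proved, stated in full; the proofs are below) =====
def Claim_equal_compress_code : Prop := ∀ (input_code : String) (max_length : Int), Dom_compress_code input_code max_length → Spec_compress_code input_code max_length (compress_code input_code max_length)

-- ===== LEMMAS AND PROOFS =====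

-- A's inner phase on a block b0 :: rest, started from empty output
def pvProcState (m : Int) (b0 : String) (rest : List String) : List String × String :=
  rest.foldl (pvInnerStep m) ([], b0)

-- the output lines A contributes for one block
def pvPb (m : Int) (block : List String) : List String :=
  match block with
  | [] => []
  | b0 :: rest => (pvProcState m b0 rest).1 ++ [(pvProcState m b0 rest).2]

-- abstraction map from A's phase-1 state to B's fused state
def pvConv (m : Int) (st : List (List String) × List String) : List String × Option String :=
  match st.2 with
  | [] => (st.1.flatMap (pvPb m), none)
  | c0 :: cr => (st.1.flatMap (pvPb m) ++ (pvProcState m c0 cr).1, some ((pvProcState m c0 cr).2))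

theorem pvInnerShift (m : Int) (rest : List String) :
    ∀ (out o : List String) (a : String),
      rest.foldl (pvInnerStep m) (out ++ o, a)
        = (out ++ (rest.foldl (pvInnerStep m) (o, a)).1,
           (rest.foldl (pvInnerStep m) (o, a)).2) := by
  induction rest with
  | nil => intro out o a; simp
  | cons l t ih =>
    intro out o a
    simp only [List.foldl_cons, pvInnerStep]
    split_ifs with h
    · simpa [List.append_assoc] using ih out (o ++ [a]) l
    · exact ih out o _

theorem pvOuterFold (m : Int) (blocks : List (List String)) :
    ∀ out : List String,
      blocks.foldl (pvOuterStep m) out = out ++ blocks.flatMap (pvPb m) := by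
  induction blocks with
  | nil => intro out; simp
  | cons b t ih =>
    intro out
    simp only [List.foldl_cons, List.flatMap_cons]
    cases b with
    | nil => simp [pvOuterStep, pvPb, ih]
    | cons b0 rest =>
      have h := pvInnerShift m rest out [] b0
      simp only [List.append_nil] at h
      simp [pvOuterStep, pvPb, pvProcState, h, ih, List.append_assoc]

theorem pvStepCommute (m : Int) (st : List (List String) × List String) (line : String) :
    pvConv m (pvSplitStep st line) = pvFusedStep m (pvConv m st) line := by
  obtain ⟨blocks, cur⟩ := st
  by_cases hb : PySem.Str.strip line = ""
  · cases cur with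
    | nil => simp [pvSplitStep, pvFusedStep, pvConv, hb]
    | cons c0 cr =>
      simp [pvSplitStep, pvFusedStep, pvConv, hb, pvPb, List.append_assoc]
  · cases cur with
    | nil => simp [pvSplitStep, pvFusedStep, pvConv, hb, pvProcState]
    | cons c0 cr =>
      have hsnoc : pvProcState m c0 (cr ++ [line])
          = pvInnerStep m (pvProcState m c0 cr) line := by
        simp [pvProcState, List.foldl_append]
      simp only [pvSplitStep, pvFusedStep, pvConv, hb, if_neg hb, if_false]
      simp only [List.cons_append, hsnoc, pvInnerStep]
      split_ifs with h
      · simp [List.append_assoc]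
      · simp

theorem pvFoldCommute (m : Int) (lines : List String) :
    ∀ st : List (List String) × List String,
      pvConv m (lines.foldl pvSplitStep st)
        = lines.foldl (pvFusedStep m) (pvConv m st) := by
  induction lines with
  | nil => intro st; rfl
  | cons l t ih =>
    intro st
    simp only [List.foldl_cons, ih, pvStepCommute]

-- ===== VERDICT (by name: the statement is the Claim_ definition above) =====
theorem compress_code_spec : Claim_equal_compress_code := by
  intro input_code max_length _
  unfold Spec_compress_code compress_code compress_code_alt
  have h := pvFoldCommute max_length (PySem.Str.splitlines input_code) ([], [])
  have hconv0 : pvConv max_length (([], []) : List (List String) × List String)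
      = (([], none) : List String × Option String) := by rfl
  rw [hconv0] at h
  rw [← h]
  cases hc : ((PySem.Str.splitlines input_code).foldl pvSplitStep ([], [])).2 with
  | nil =>
    simp [pvOuterFold, pvConv, hc]
  | cons c0 cr =>
    have hs := pvInnerShift max_length cr
      (List.flatMap (pvPb max_length)
        ((PySem.Str.splitlines input_code).foldl pvSplitStep ([], [])).1) [] c0
    simp only [List.append_nil] at hs
    simp [pvOuterFold, pvConv, hc, pvOuterStep, pvProcState, hs, List.append_assoc]
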